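-- pv_equiv track=rewrite | github.com/autonomous-search-and-rescue-droid/flask-ai | UI/dashboard.py | get_language_from_filename
-- ===== SOURCE A (Python) =====
-- def get_language_from_filename(filename):
--     """Get syntax highlighting language from filename extension"""
--     ext_map = {
--         '.py': 'python',
--         '.js': 'javascript',
--         '.ts': 'typescript',
--         '.html': 'html',
--         '.css': 'css',
--         '.json': 'json',
--         '.yaml': 'yaml',
--         '.yml': 'yaml',
--         '.md': 'markdown',
--         '.sh': 'bash',
--         '.bash': 'bash',
--         '.sql': 'sql',
--         '.xml': 'xml',
--         '.c': 'c',
--         '.cpp': 'cpp',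
--         '.h': 'c',
--         '.java': 'java',
--         '.go': 'go',
--         '.rs': 'rust',
--         '.rb': 'ruby',
--         '.php': 'php',
--     }
--
--     for ext, lang in ext_map.items():
--         if filename.lower().endswith(ext):
--             return lang
--     return None
-- ===== SOURCE B (Python) =====
-- def _lang_of(ext):
--     if ext == '.py': return 'python'
--     if ext == '.js': return 'javascript'
--     if ext == '.ts': return 'typescript'
--     if ext == '.html': return 'html'
--     if ext == '.css': return 'css'
--     if ext == '.json': return 'json'
--     if ext == '.yaml': return 'yaml'
--     if ext == '.yml': return 'yaml'
--     if ext == '.md': return 'markdown'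
--     if ext == '.sh': return 'bash'
--     if ext == '.bash': return 'bash'
--     if ext == '.sql': return 'sql'
--     if ext == '.xml': return 'xml'
--     if ext == '.c': return 'c'
--     if ext == '.cpp': return 'cpp'
--     if ext == '.h': return 'c'
--     if ext == '.java': return 'java'
--     if ext == '.go': return 'go'
--     if ext == '.rs': return 'rust'
--     if ext == '.rb': return 'ruby'
--     if ext == '.php': return 'php'
--     return None
--
--
-- def get_language_from_filename(filename):
--     """Get syntax highlighting language from filename extension"""
--     parts = []
--     for ch in reversed(filename):
--         if ch == '.':
--             return _lang_of('.' + ''.join(reversed(parts)))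
--         parts.append(ch.lower())
--     return None
-- ===== Notes on version B (the rewrite author's own statement) =====
-- stated objective: alternative
-- what changed: Instead of scanning the whole extension map and testing a lowercased copy of the filename with endswith for each entry, B walks the filename backwards to the last dot, building the lowercased extension as it goes, and dispatches that one key through a direct conditional mapping.
import Mathlib
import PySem

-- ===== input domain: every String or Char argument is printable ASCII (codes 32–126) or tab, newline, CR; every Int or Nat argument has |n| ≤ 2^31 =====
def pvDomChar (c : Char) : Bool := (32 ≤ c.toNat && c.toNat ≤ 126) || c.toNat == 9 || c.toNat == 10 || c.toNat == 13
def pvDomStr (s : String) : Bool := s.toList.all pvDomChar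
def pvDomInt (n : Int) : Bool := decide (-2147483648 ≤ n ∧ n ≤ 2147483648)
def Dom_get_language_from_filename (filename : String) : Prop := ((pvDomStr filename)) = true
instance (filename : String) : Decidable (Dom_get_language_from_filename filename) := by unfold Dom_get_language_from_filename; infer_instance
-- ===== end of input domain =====

-- B walks the filename backwards to the last dot, building the lowercased extension,
-- and dispatches it through a direct conditional mapping, instead of A's endswith scan
-- over the whole extension map; same results, no speed claim.

-- ===== PORT A =====
-- the ext_map literal of A, as an insertion-ordered association list
def pvExtPairs : List (String × String) :=
  [(".py", "python"), (".js", "javascript"), (".ts", "typescript"), (".html", "html"),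
   (".css", "css"), (".json", "json"), (".yaml", "yaml"), (".yml", "yaml"),
   (".md", "markdown"), (".sh", "bash"), (".bash", "bash"), (".sql", "sql"),
   (".xml", "xml"), (".c", "c"), (".cpp", "cpp"), (".h", "c"),
   (".java", "java"), (".go", "go"), (".rs", "rust"), (".rb", "ruby"), (".php", "php")]

-- the 'for ext, lang in ext_map.items(): if filename.lower().endswith(ext): return lang' loop
def pvLoopA (filename : String) : List (String × String) → Option String
  | [] => none
  | (ext, lang) :: rest =>
      if PySem.Str.endswith (PySem.Str.lower filename) ext then some lang
      else pvLoopA filename rest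

def get_language_from_filename (filename : String) : Option String :=
  pvLoopA filename pvExtPairs

-- ===== PORT B =====
-- Source B's _lang_of: a chain of equality tests
def pvLangOf (ext : String) : Option String :=
  if ext = ".py" then some "python" else
  if ext = ".js" then some "javascript" else
  if ext = ".ts" then some "typescript" else
  if ext = ".html" then some "html" else
  if ext = ".css" then some "css" else
  if ext = ".json" then some "json" else
  if ext = ".yaml" then some "yaml" else
  if ext = ".yml" then some "yaml" else
  if ext = ".md" then some "markdown" else
  if ext = ".sh" then some "bash" else
  if ext = ".bash" then some "bash" else
  if ext = ".sql" then some "sql" else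
  if ext = ".xml" then some "xml" else
  if ext = ".c" then some "c" else
  if ext = ".cpp" then some "cpp" else
  if ext = ".h" then some "c" else
  if ext = ".java" then some "java" else
  if ext = ".go" then some "go" else
  if ext = ".rs" then some "rust" else
  if ext = ".rb" then some "ruby" else
  if ext = ".php" then some "php" else
  none

-- Source B's loop over reversed(filename), appending the lowercased chars,
-- reversed back and joined at the dot
def pvScanB (acc : List Char) : List Char → Option String
  | [] => none
  | ch :: rest =>
      if ch = '.' then pvLangOf (String.ofList ('.' :: acc.reverse))
      else pvScanB (acc ++ [PySem.Chars.lowerChar ch]) rest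

def get_language_from_filename_alt (filename : String) : Option String :=
  pvScanB [] filename.toList.reverse

-- ===== PRECONDITION & SPEC =====
def Spec_get_language_from_filename (filename : String) (out : Option String) : Prop := out = get_language_from_filename_alt filename
instance (filename : String) (out : Option String) : Decidable (Spec_get_language_from_filename filename out) := by unfold Spec_get_language_from_filename; infer_instance

-- ===== CLAIM (what is proved, stated in full; the proofs are below) =====
def Claim_equal_get_language_from_filename : Prop := ∀ (filename : String), Dom_get_language_from_filename filename → Spec_get_language_from_filename filename (get_language_from_filename filename)

-- ===== LEMMAS AND PROOFS =====

-- Char order / toNat bridge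
lemma char_le_toNat {a b : Char} : a ≤ b ↔ a.toNat ≤ b.toNat := by
  rw [Char.le_def, UInt32.le_iff_toNat_le]; rfl

-- lowercasing cannot create or destroy a dot
lemma lowerChar_eq_dot_iff (c : Char) : PySem.Chars.lowerChar c = '.' ↔ c = '.' := by
  unfold PySem.Chars.lowerChar PySem.Chars.isupper
  split_ifs with h
  · simp only [Bool.and_eq_true, decide_eq_true_eq, char_le_toNat] at h
    have hA : ('A' : Char).toNat = 65 := by decide
    have hZ : ('Z' : Char).toNat = 90 := by decide
    rw [hA] at h; rw [hZ] at h
    constructor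
    · intro hc
      exfalso
      have hv : (c.toNat + 32).isValidChar := by
        constructor; omega
      have ht := Char.toNat_ofNat (c.toNat + 32)
      rw [hc, if_pos hv] at ht
      have : ('.' : Char).toNat = 46 := by decide
      omega
    · intro hc
      exfalso
      rw [hc] at h
      have : ('.' : Char).toNat = 46 := by decide
      omega
  · simp

-- the suffix test against a dot-extension is exactly "equal to the last-dot suffix"
lemma endswith_ext_iff (cs : List Char) (i : Nat) (u : List Char)
    (hu : '.' ∉ u)
    (hi : cs[i]? = some '.') (hlast : ∀ j, i < j → cs[j]? ≠ some '.') :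
    ('.' :: u <:+ PySem.Chars.lower cs ↔ '.' :: u = PySem.Chars.lower (cs.drop i)) := by
  constructor
  · rintro ⟨t, ht⟩
    have hp : (PySem.Chars.lower cs)[t.length]? = some '.' := by
      rw [← ht, List.getElem?_append_right le_rfl]
      simp
    have hcp : cs[t.length]? = some '.' := by
      unfold PySem.Chars.lower at hp
      rw [List.getElem?_map] at hp
      rcases hv : cs[t.length]? with _ | c
      · rw [hv] at hp; simp at hp
      · rw [hv] at hp; simp at hp
        rw [(lowerChar_eq_dot_iff c).1 hp]
    have hle : t.length ≤ i := by
      by_contra hgt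
      exact hlast t.length (by omega) hcp
    have hge : i ≤ t.length := by
      by_contra hlt
      simp at hlt
      have hilen : i < cs.length := (List.getElem?_eq_some_iff.1 hi).1
      have hli : (PySem.Chars.lower cs)[i]? = some '.' := by
        unfold PySem.Chars.lower
        rw [List.getElem?_map, hi]; simp [(lowerChar_eq_dot_iff '.').2 rfl]
      rw [← ht, List.getElem?_append_right (by omega)] at hli
      rcases Nat.exists_eq_add_of_lt hlt with ⟨m, hm⟩
      have : i - t.length = m + 1 := by omega
      rw [this, List.getElem?_cons_succ] at hli
      exact hu (List.mem_of_getElem? hli)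
    have hpi : t.length = i := by omega
    have : ('.' :: u) = (PySem.Chars.lower cs).drop i := by
      rw [← hpi, ← ht, List.drop_left]
    rw [this]
    unfold PySem.Chars.lower
    rw [List.map_drop]
  · intro h
    rw [h]
    unfold PySem.Chars.lower
    rw [List.map_drop]
    exact List.drop_suffix i _

-- the loop, when no entry can match
lemma pvLoopA_none (filename : String) (ps : List (String × String))
    (h : ∀ p ∈ ps, PySem.Str.endswith (PySem.Str.lower filename) p.1 = false) :
    pvLoopA filename ps = none := by
  induction ps with
  | nil => rfl
  | cons p rest ih =>
      obtain ⟨ext, lang⟩ := p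
      simp only [pvLoopA, h _ (List.mem_cons_self ..)]
      exact ih fun q hq => h q (List.mem_cons_of_mem _ hq)

-- the loop, when matching is "key equals K": first match = assoc lookup
lemma pvLoopA_lookup (filename : String) (ps : List (String × String)) (K : String)
    (h : ∀ p ∈ ps, (PySem.Str.endswith (PySem.Str.lower filename) p.1 = true ↔ p.1 = K)) :
    pvLoopA filename ps = (ps.find? (fun p => p.1 == K)).map (·.2) := by
  induction ps with
  | nil => rfl
  | cons p rest ih =>
      obtain ⟨ext, lang⟩ := p
      have ih' := ih fun q hq => h q (List.mem_cons_of_mem _ hq)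
      by_cases he : PySem.Str.endswith (PySem.Str.lower filename) ext = true
      · have hk : ext = K := (h _ (List.mem_cons_self ..)).1 he
        subst hk
        simp only [pvLoopA]
        rw [if_pos he]
        simp
      · have hk : (ext == K) = false := by
          simpa using fun hek => he ((h _ (List.mem_cons_self ..)).2 hek)
        simp only [pvLoopA]
        rw [if_neg he]
        simp only [List.find?_cons, hk]
        exact ih'

-- one extension test of the loop, under knowledge of the last dot position
lemma endswith_test_iff (filename : String) (i : Nat) (K ext : String)
    (hK : K.toList = PySem.Chars.lower (filename.toList.drop i))
    (hdot : filename.toList[i]? = some '.')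
    (hlast : ∀ j, i < j → filename.toList[j]? ≠ some '.')
    (hext : ∃ u, ext.toList = '.' :: u ∧ '.' ∉ u) :
    (PySem.Str.endswith (PySem.Str.lower filename) ext = true ↔ ext = K) := by
  obtain ⟨u, hexteq, hu⟩ := hext
  rw [PySem.Str.endswith_eq, PySem.Str.toList_lower, hexteq, PySem.Chars.endswith_iff,
      endswith_ext_iff _ i u hu hdot hlast, ← hK, ← hexteq, ← String.toList_inj]

-- B's conditional chain computes exactly A's first-match lookup in pvExtPairs
lemma pvLangOf_eq_find (K : String) :
    (pvExtPairs.find? (fun p => p.1 == K)).map (·.2) = pvLangOf K := by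
  by_cases h0 : K = ".py"
  · subst h0; decide
  by_cases h1 : K = ".js"
  · subst h1; decide
  by_cases h2 : K = ".ts"
  · subst h2; decide
  by_cases h3 : K = ".html"
  · subst h3; decide
  by_cases h4 : K = ".css"
  · subst h4; decide
  by_cases h5 : K = ".json"
  · subst h5; decide
  by_cases h6 : K = ".yaml"
  · subst h6; decide
  by_cases h7 : K = ".yml"
  · subst h7; decide
  by_cases h8 : K = ".md"
  · subst h8; decide
  by_cases h9 : K = ".sh"
  · subst h9; decide
  by_cases h10 : K = ".bash"
  · subst h10; decide
  by_cases h11 : K = ".sql"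
  · subst h11; decide
  by_cases h12 : K = ".xml"
  · subst h12; decide
  by_cases h13 : K = ".c"
  · subst h13; decide
  by_cases h14 : K = ".cpp"
  · subst h14; decide
  by_cases h15 : K = ".h"
  · subst h15; decide
  by_cases h16 : K = ".java"
  · subst h16; decide
  by_cases h17 : K = ".go"
  · subst h17; decide
  by_cases h18 : K = ".rs"
  · subst h18; decide
  by_cases h19 : K = ".rb"
  · subst h19; decide
  by_cases h20 : K = ".php"
  · subst h20; decide
  have e : ∀ (k : String), ¬K = k → (k == K) = false :=
    fun k hk => beq_eq_false_iff_ne.2 (Ne.symm hk)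
  simp [pvExtPairs, pvLangOf, List.find?, e _ h0, e _ h1, e _ h2, e _ h3, e _ h4, e _ h5, e _ h6, e _ h7, e _ h8, e _ h9, e _ h10, e _ h11, e _ h12, e _ h13, e _ h14, e _ h15, e _ h16, e _ h17, e _ h18, e _ h19, e _ h20, h0, h1, h2, h3, h4, h5, h6, h7, h8, h9, h10, h11, h12, h13, h14, h15, h16, h17, h18, h19, h20]

-- B's scan when there is no dot at all
lemma pvScanB_no_dot (r : List Char) (acc : List Char) (h : ('.' : Char) ∉ r) :
    pvScanB acc r = none := by
  induction r generalizing acc with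
  | nil => rfl
  | cons c t ih =>
      simp only [pvScanB]
      rw [if_neg (by rintro rfl; exact h (List.mem_cons_self ..))]
      exact ih _ fun hm => h (List.mem_cons_of_mem _ hm)

-- B's scan up to the first dot of the reversed list
lemma pvScanB_split (u v : List Char) (acc : List Char) (hu : ('.' : Char) ∉ u) :
    pvScanB acc (u ++ '.' :: v) =
      pvLangOf (String.ofList ('.' :: (acc ++ u.map PySem.Chars.lowerChar).reverse)) := by
  induction u generalizing acc with
  | nil => simp [pvScanB]
  | cons c t ih =>
      simp only [List.cons_append, pvScanB]
      rw [if_neg (by rintro rfl; exact hu (List.mem_cons_self ..))]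
      rw [ih _ fun hm => hu (List.mem_cons_of_mem _ hm)]
      simp [List.append_assoc]

-- first occurrence split of a member
lemma first_dot_split (r : List Char) (h : ('.' : Char) ∈ r) :
    ∃ u v, r = u ++ '.' :: v ∧ ('.' : Char) ∉ u := by
  induction r with
  | nil => cases h
  | cons c t ih =>
      by_cases hc : c = '.'
      · subst hc; exact ⟨[], t, rfl, by simp⟩
      · have ht : ('.' : Char) ∈ t := by
          rcases List.mem_cons.1 h with h1 | h1
          · exact absurd h1.symm hc
          · exact h1
        obtain ⟨u, v, hr, hu⟩ := ih ht
        refine ⟨c :: u, v, by simp [hr], ?_⟩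
        simp only [List.mem_cons, not_or]
        exact ⟨Ne.symm hc, hu⟩

-- ===== VERDICT (by name: the statement is the Claim_ definition above) =====
theorem get_language_from_filename_spec : Claim_equal_get_language_from_filename := by
  intro filename _
  unfold Spec_get_language_from_filename get_language_from_filename get_language_from_filename_alt
  set s := filename.toList with hs
  by_cases hmem : ('.' : Char) ∈ s
  · -- there is a dot: both return the language of the lowercased last-dot suffix
    obtain ⟨u, v, hr, hu⟩ := first_dot_split s.reverse (by simpa using hmem)
    have hsdec : s = v.reverse ++ '.' :: u.reverse := by
      have := congrArg List.reverse hr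
      simpa [List.append_assoc] using this
    set i := v.reverse.length with hi
    have hdrop : s.drop i = '.' :: u.reverse := by
      rw [hsdec, List.drop_left' rfl]
    have hdot : s[i]? = some '.' := by
      rw [hsdec, List.getElem?_append_right le_rfl]
      simp
    have hlast : ∀ j, i < j → s[j]? ≠ some '.' := by
      intro j hij hcontra
      rcases Nat.exists_eq_add_of_lt hij with ⟨m, hm⟩
      subst hm
      rw [hsdec, List.getElem?_append_right (by omega)] at hcontra
      have hidx : i + m + 1 - v.reverse.length = m + 1 := by omega
      rw [hidx, List.getElem?_cons_succ] at hcontra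
      exact hu (by simpa using List.mem_of_getElem? hcontra)
    set K := String.ofList (PySem.Chars.lower (s.drop i)) with hKdef
    have hK : K.toList = PySem.Chars.lower (s.drop i) := by simp [hKdef]
    rw [pvLoopA_lookup filename pvExtPairs K
          (fun p hp => endswith_test_iff filename i K p.1 hK hdot hlast
            (by fin_cases hp <;> exact ⟨_, rfl, by decide⟩)),
        pvLangOf_eq_find]
    rw [hr, pvScanB_split _ _ _ hu]
    congr 1
    rw [hKdef, hdrop]
    unfold PySem.Chars.lower
    simp [List.map_reverse, (lowerChar_eq_dot_iff '.').2 rfl]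
  · -- no dot anywhere: A matches no extension, B exhausts the reversed scan
    rw [pvScanB_no_dot _ _ (by simpa using hmem)]
    apply pvLoopA_none
    intro p hp
    have hdp : ('.' : Char) ∈ p.1.toList := by fin_cases hp <;> decide
    rw [Bool.eq_false_iff]
    intro htrue
    rw [PySem.Str.endswith_eq, PySem.Chars.endswith_iff] at htrue
    have : ('.' : Char) ∈ (PySem.Str.lower filename).toList := htrue.mem hdp
    rw [PySem.Str.toList_lower] at this
    obtain ⟨c, hc, hlc⟩ := List.mem_map.1 this
    exact hmem ((lowerChar_eq_dot_iff c).1 hlc ▸ hc)
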